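-- pv_equiv track=rewrite | github.com/brndngln/AIFOLIO_FINAL_V12 | autonomy/analytics.py | get_per_status_breakdown
-- ===== SOURCE A (Python) =====
-- from typing import Dict, Any, List, Optional, Tuple, Callable, TypedDict, Union
--
-- class AuditEvent(TypedDict, total=False):
--     timestamp: Optional[str]
--     key: Optional[str]
--     action: Optional[str]
--     endpoint: Optional[str]
--     status: Optional[str]
--     latency: Optional[float]
--
-- def get_per_status_breakdown(events: List[AuditEvent]) -> Dict[str, Dict[str, int]]:
--     result: Dict[str, Dict[str, int]] = {}
--     for e in events:
--         status = e.get("status", None)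
--         ep = e.get("endpoint", None)
--         if status and ep:
--             if status not in result:
--                 result[status] = {}
--             result[status][ep] = result[status].get(ep, 0) + 1
--     return result
-- ===== SOURCE B (Python) =====
-- def get_per_status_breakdown(events):
--     # two-stage: extract (status, endpoint) pairs, then group by status and count endpoints
--     pairs = [(e.get("status"), e.get("endpoint")) for e in events]
--     pairs = [(s, p) for (s, p) in pairs if s and p]
--     result = {}
--     for s in dict.fromkeys(s for s, _ in pairs):
--         eps = [p for s2, p in pairs if s2 == s]
--         result[s] = {p: eps.count(p) for p in dict.fromkeys(eps)}
--     return result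
-- ===== Notes on version B (the rewrite author's own statement) =====
-- stated objective: alternative
-- what changed: Replaces A's single-pass incremental dict-of-dicts update with a two-stage pipeline: filter out the (status, endpoint) pairs, dedupe statuses in first-occurrence order, and build each inner dict by counting endpoints within the status group.
import Mathlib
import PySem

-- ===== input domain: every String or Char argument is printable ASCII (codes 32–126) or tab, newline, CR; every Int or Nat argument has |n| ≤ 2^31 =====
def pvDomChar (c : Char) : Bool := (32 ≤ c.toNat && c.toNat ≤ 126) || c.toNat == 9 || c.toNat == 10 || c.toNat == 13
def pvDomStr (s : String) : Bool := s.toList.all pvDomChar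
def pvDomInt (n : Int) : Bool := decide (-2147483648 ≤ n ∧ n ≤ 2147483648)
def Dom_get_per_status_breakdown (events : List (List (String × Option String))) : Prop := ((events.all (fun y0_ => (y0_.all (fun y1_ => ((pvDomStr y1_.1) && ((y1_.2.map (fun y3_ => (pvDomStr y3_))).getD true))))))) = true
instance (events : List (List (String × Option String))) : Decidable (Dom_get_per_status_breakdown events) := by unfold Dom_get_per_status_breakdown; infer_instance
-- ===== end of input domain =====

-- A single-pass dict-of-dicts tally, re-implemented as a two-stage pipeline (filter pairs,
-- dedupe statuses, count endpoints per status group); alternative decomposition, same results.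


-- ===== PORT A =====
-- A's loop body: status = e.get("status", None); ep = e.get("endpoint", None);
-- if status and ep: (ensure result[status] exists) then result[status][ep] += 1
def pvStepA (result : PySem.Dict String (PySem.Dict String Int))
    (e : List (String × Option String)) : PySem.Dict String (PySem.Dict String Int) :=
  let status := (PySem.Dict.mk e).getD "status" none
  let ep := (PySem.Dict.mk e).getD "endpoint" none
  match status, ep with
  | some s, some p =>
      if s != "" && p != "" then
        let result' := if result.contains s then result else result.insert s PySem.Dict.empty
        let inner := result'.getD s PySem.Dict.empty
        result'.insert s (inner.insert p (inner.getD p 0 + 1))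
      else result
  | _, _ => result

def get_per_status_breakdown (events : List (List (String × Option String))) : List (String × List (String × Int)) :=
  let result := events.foldl pvStepA PySem.Dict.empty
  result.items.map (fun kv => (kv.1, kv.2.items))

-- ===== PORT B =====
-- the filtered (status, endpoint) pair list: both present and truthy (non-empty)
def pvPairs (events : List (List (String × Option String))) : List (String × String) :=
  (events.map (fun e => ((PySem.Dict.mk e).getD "status" none, (PySem.Dict.mk e).getD "endpoint" none))).filterMap
    (fun sp => match sp with
      | (some s, some p) => if s != "" && p != "" then some (s, p) else none
      | _ => none)

def get_per_status_breakdown_alt (events : List (List (String × Option String))) : List (String × List (String × Int)) :=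
  let pairs := pvPairs events
  (PySem.List.dedup (pairs.map Prod.fst)).map (fun s =>
    let eps := (pairs.filter (fun q => q.1 == s)).map Prod.snd
    (s, (PySem.List.dedup eps).map (fun p => (p, (eps.count p : Int)))))

-- ===== PRECONDITION & SPEC =====
def Spec_get_per_status_breakdown (events : List (List (String × Option String))) (out : List (String × List (String × Int))) : Prop := out = get_per_status_breakdown_alt events
instance (events : List (List (String × Option String))) (out : List (String × List (String × Int))) : Decidable (Spec_get_per_status_breakdown events out) := by unfold Spec_get_per_status_breakdown; infer_instance

-- ===== CLAIM (what is proved, stated in full; the proofs are below) =====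
def Claim_equal_get_per_status_breakdown : Prop := ∀ (events : List (List (String × Option String))), Dom_get_per_status_breakdown events → Spec_get_per_status_breakdown events (get_per_status_breakdown events)

-- ===== LEMMAS AND PROOFS =====

-- A's step, written uniformly as a modify of the outer dict
def pvUpd (d : PySem.Dict String (PySem.Dict String Int)) (q : String × String) :
    PySem.Dict String (PySem.Dict String Int) :=
  d.modify q.1 PySem.Dict.empty (fun inner => inner.insert q.2 (inner.getD q.2 0 + 1))

lemma pvStepA_eq_upd (d : PySem.Dict String (PySem.Dict String Int)) (s p : String) :
    (let d' := if d.contains s then d else d.insert s PySem.Dict.empty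
     let inner := d'.getD s PySem.Dict.empty
     d'.insert s (inner.insert p (inner.getD p 0 + 1))) = pvUpd d (s, p) := by
  show _ = d.insert s (((d.getD s PySem.Dict.empty)).insert p ((d.getD s PySem.Dict.empty).getD p 0 + 1))
  by_cases h : d.contains s = true
  · simp only [h, if_true]
  · have hf : d.contains s = false := by simpa using h
    simp only [h, Bool.false_eq_true, if_false, PySem.Dict.getD_insert_self,
      PySem.Dict.insert_insert_self]
    rw [PySem.Dict.getD_of_not_contains _ _ hf]

-- folding A's step over events is folding pvUpd over the filtered pair list
lemma pvFoldA (events : List (List (String × Option String)))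
    (d : PySem.Dict String (PySem.Dict String Int)) :
    events.foldl pvStepA d = (pvPairs events).foldl pvUpd d := by
  induction events generalizing d with
  | nil => rfl
  | cons e rest ih =>
      simp only [pvPairs, List.map_cons, List.filterMap_cons] at ih ⊢
      simp only [List.foldl_cons]
      cases hs : (PySem.Dict.mk e).getD "status" none with
      | none =>
          simp only [pvStepA, hs]
          exact ih d
      | some st =>
          cases hp : (PySem.Dict.mk e).getD "endpoint" none with
          | none =>
              simp only [pvStepA, hs, hp]
              exact ih d
          | some ep =>
              by_cases ht : (st != "" && ep != "") = true
              · simp only [pvStepA, hs, hp, ht, if_true, List.foldl_cons]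
                rw [pvStepA_eq_upd d st ep]
                exact ih _
              · simp only [pvStepA, hs, hp, Bool.not_eq_true] at ht ⊢
                simp only [ht, Bool.false_eq_true, if_false]
                exact ih d

-- inner-dict invariant of the pvUpd fold
lemma pvGetD_fold (ps : List (String × String)) (d : PySem.Dict String (PySem.Dict String Int)) (s : String) :
    (ps.foldl pvUpd d).getD s PySem.Dict.empty
      = ((ps.filter (fun q => q.1 == s)).map Prod.snd).foldl
          (fun inner p => inner.insert p (inner.getD p 0 + 1)) (d.getD s PySem.Dict.empty) := by
  induction ps generalizing d with
  | nil => rfl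
  | cons q rest ih =>
      simp only [List.foldl_cons, List.filter_cons]
      by_cases h : q.1 = s
      · simp only [h, beq_self_eq_true, if_true, List.map_cons, List.foldl_cons, ih]
        rw [pvUpd, h, PySem.Dict.getD_modify_self]
      · have : (q.1 == s) = false := by simpa using h
        simp only [this, Bool.false_eq_true, if_false, ih]
        rw [pvUpd, PySem.Dict.getD_modify_of_ne d PySem.Dict.empty _ (Ne.symm h)]

-- keys of the pvUpd fold, via the library's modify-key lemmas
lemma pvKeys_fold (ps : List (String × String)) :
    (ps.foldl pvUpd PySem.Dict.empty).keys = PySem.Set.ofList (ps.map Prod.fst) := by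
  have h := PySem.Dict.keys_foldl_modify_key (ν := PySem.Dict String Int) ps Prod.fst
      PySem.Dict.empty (fun _ q inner => inner.insert q.2 (inner.getD q.2 0 + 1)) PySem.Dict.empty
  have e : pvUpd = (fun d x => d.modify x.1 PySem.Dict.empty
      fun inner => inner.insert x.2 (inner.getD x.2 0 + 1)) := rfl
  simp only [PySem.Dict.keys_empty, PySem.Set.update_nil_left] at h
  rw [e]
  exact h

lemma pvNodup_fold (ps : List (String × String)) :
    (ps.foldl pvUpd PySem.Dict.empty).keys.Nodup := by
  rw [pvKeys_fold]
  exact PySem.Set.nodup_ofList _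

-- ===== VERDICT (by name: the statement is the Claim_ definition above) =====
theorem get_per_status_breakdown_spec : Claim_equal_get_per_status_breakdown := by
  intro events _
  unfold Spec_get_per_status_breakdown get_per_status_breakdown get_per_status_breakdown_alt
  rw [pvFoldA]
  dsimp only
  rw [PySem.Dict.items_eq_map_keys _ (pvNodup_fold (pvPairs events)) PySem.Dict.empty]
  rw [pvKeys_fold, List.map_map, PySem.List.dedup_eq_ofList]
  refine List.map_congr_left (fun s _ => ?_)
  simp only [Function.comp_apply]
  rw [pvGetD_fold, PySem.Dict.getD_empty, PySem.Dict.foldl_insert_getD_add_one_eq_counter,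
    PySem.Dict.items_counter, PySem.List.dedup_eq_ofList]
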